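-- pv_equiv track=rewrite | github.com/mud-ali/advent-of-code-2024 | day09/part1.py | has_gap
-- ===== SOURCE A (Python) =====
-- def has_gap(disk_state: list[str]) -> bool:
--     seenDot = False
--     for block in disk_state:
--         if block=='.':
--             seenDot = True
--         elif seenDot:
--             return True
--
--     return False
-- ===== SOURCE B (Python) =====
-- def has_gap(disk_state: list[str]) -> bool:
--     first_dot = None
--     last_nondot = None
--     for i, block in enumerate(disk_state):
--         if block == '.':
--             if first_dot is None:
--                 first_dot = i
--         else:
--             last_nondot = i
--     return first_dot is not None and last_nondot is not None and first_dot < last_nondot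
-- ===== Notes on version B (the rewrite author's own statement) =====
-- stated objective: alternative
-- what changed: Replaces the early-returning seen-flag scan by a full single pass that records the first '.' index and the last non-'.' index and finally compares the two positions.
import Mathlib
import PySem

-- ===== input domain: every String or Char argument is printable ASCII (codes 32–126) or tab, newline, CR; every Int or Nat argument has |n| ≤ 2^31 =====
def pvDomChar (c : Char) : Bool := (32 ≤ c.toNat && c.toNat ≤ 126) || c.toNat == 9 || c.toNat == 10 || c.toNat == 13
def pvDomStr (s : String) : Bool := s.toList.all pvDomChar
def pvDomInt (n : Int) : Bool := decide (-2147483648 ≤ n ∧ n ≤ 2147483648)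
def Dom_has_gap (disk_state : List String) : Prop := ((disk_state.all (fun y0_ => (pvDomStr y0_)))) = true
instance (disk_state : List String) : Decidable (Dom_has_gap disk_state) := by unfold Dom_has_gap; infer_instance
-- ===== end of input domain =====

-- B replaces A's early-returning seen-flag scan by a full pass recording the first '.' index
-- and the last non-'.' index, finally comparing the two positions (alternative decomposition).

-- ===== PORT A =====
-- A: stateful flag loop with early return
def hasGapAux (seenDot : Bool) : List String → Bool
  | [] => false
  | block :: rest =>
    if block == "." then hasGapAux true rest
    else if seenDot then true
    else hasGapAux seenDot rest

def has_gap (disk_state : List String) : Bool := hasGapAux false disk_state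

-- ===== PORT B =====
-- B: one pass over enumerate recording first-dot and last-non-dot indices, then compare
def gapLoop (i : Nat) (firstDot lastNonDot : Option Nat) : List String → Bool
  | [] =>
    match firstDot, lastNonDot with
    | some f, some l => decide (f < l)
    | _, _ => false
  | block :: rest =>
    if block == "." then
      gapLoop (i + 1) (if firstDot.isNone then some i else firstDot) lastNonDot rest
    else
      gapLoop (i + 1) firstDot (some i) rest

def has_gap_alt (disk_state : List String) : Bool := gapLoop 0 none none disk_state

-- ===== PRECONDITION & SPEC =====
def Spec_has_gap (disk_state : List String) (out : Bool) : Prop := out = has_gap_alt disk_state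
instance (disk_state : List String) (out : Bool) : Decidable (Spec_has_gap disk_state out) := by unfold Spec_has_gap; infer_instance

-- ===== CLAIM (what is proved, stated in full; the proofs are below) =====
def Claim_equal_has_gap : Prop := ∀ (disk_state : List String), Dom_has_gap disk_state → Spec_has_gap disk_state (has_gap disk_state)

-- ===== LEMMAS AND PROOFS =====
-- proof helper: the final comparison gapLoop makes at the end of the list
def cmpIdx (fd ln : Option Nat) : Bool :=
  match fd, ln with
  | some f, some l => decide (f < l)
  | _, _ => false

-- loop invariant: with both recorded indices below the running index i,
-- B's loop result equals the current comparison ∨ A's remaining scan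
theorem gapLoop_key (xs : List String) (i : Nat) (fd ln : Option Nat)
    (hf : ∀ f, fd = some f → f < i) (hl : ∀ l, ln = some l → l < i) :
    gapLoop i fd ln xs = (cmpIdx fd ln || hasGapAux fd.isSome xs) := by
  induction xs generalizing i fd ln with
  | nil => cases fd <;> cases ln <;> simp [gapLoop, hasGapAux, cmpIdx]
  | cons b rest ih =>
    by_cases hb : b == "."
    · cases fd with
      | some f =>
        simp only [gapLoop, hasGapAux, hb, if_pos, Option.isNone_some, Bool.false_eq_true,
          if_neg, not_false_iff]
        rw [ih (i + 1) (some f) ln (by intro f' h; cases h; exact Nat.lt_succ_of_lt (hf f rfl))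
            (fun l h => Nat.lt_succ_of_lt (hl l h))]
        rfl
      | none =>
        simp only [gapLoop, hasGapAux, hb, if_pos, Option.isNone_none]
        rw [ih (i + 1) (some i) ln (by intro f' h; cases h; omega)
            (fun l h => Nat.lt_succ_of_lt (hl l h))]
        cases ln with
        | none => simp [cmpIdx]
        | some l =>
          have : ¬ (i < l) := by have := hl l rfl; omega
          simp [cmpIdx, this]
    · cases fd with
      | some f =>
        have hfi : f < i := hf f rfl
        simp only [gapLoop, hasGapAux, hb, if_neg, Bool.false_eq_true, not_false_iff,
          Option.isSome_some, if_pos]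
        rw [ih (i + 1) (some f) (some i) (by intro f' h; cases h; omega)
            (by intro l h; cases h; omega)]
        simp [cmpIdx, hfi]
      | none =>
        simp only [gapLoop, hasGapAux, hb, if_neg, Bool.false_eq_true, not_false_iff,
          Option.isSome_none]
        rw [ih (i + 1) none (some i) (by intro f' h; cases h)
            (by intro l h; cases h; omega)]
        simp [cmpIdx]

-- ===== VERDICT (by name: the statement is the Claim_ definition above) =====
theorem has_gap_spec : Claim_equal_has_gap := by
  intro disk_state _
  unfold Spec_has_gap has_gap has_gap_alt
  rw [gapLoop_key disk_state 0 none none (by simp) (by simp)]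
  simp [cmpIdx]
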